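-- pv_equiv track=rewrite | github.com/alexeymishkin/Learning | PyBursa/03/Docs/3.py | vov
-- ===== SOURCE A (Python) =====
-- def vov(input_text):
--     max_vov = 0
--     vovs = 'AOUIEYaouiey'
--     temp = input_text.split(' ')
--     for word in temp:
--         max_vov_temp = 0
--         for l in word:
--             if l in vovs:
--                 max_vov_temp += 1
--         if max_vov_temp > max_vov:
--             max_vov = max_vov_temp
--     return max_vov
-- ===== SOURCE B (Python) =====
-- def vov(input_text):
--     vowels = 'AOUIEYaouiey'
--     best = 0
--     current = 0
--     for ch in input_text:
--         if ch == ' ':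
--             best = max(best, current)
--             current = 0
--         elif ch in vowels:
--             current += 1
--     return max(best, current)
-- ===== Notes on version B (the rewrite author's own statement) =====
-- stated objective: simpler
-- what changed: B replaces split plus a nested per-word loop with a single left-to-right scan keeping two counters (current word's vowel count, best so far), resetting the current counter at each space separator and taking one final max.
import Mathlib
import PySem

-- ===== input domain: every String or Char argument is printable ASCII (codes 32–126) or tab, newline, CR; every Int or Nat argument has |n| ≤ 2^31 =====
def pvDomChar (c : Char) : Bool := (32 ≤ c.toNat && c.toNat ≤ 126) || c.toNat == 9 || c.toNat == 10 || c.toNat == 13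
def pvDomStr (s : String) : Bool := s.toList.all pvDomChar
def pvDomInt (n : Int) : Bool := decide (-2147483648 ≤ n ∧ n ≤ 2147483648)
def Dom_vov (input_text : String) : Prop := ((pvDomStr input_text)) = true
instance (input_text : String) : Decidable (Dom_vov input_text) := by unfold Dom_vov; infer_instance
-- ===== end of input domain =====

-- B replaces split(' ') + nested per-word loop with one left-to-right scan keeping two
-- counters (current word's vowel count and best so far); objective: simpler (same O(n) cost).


-- ===== PORT A =====
-- input_text.split(' ') with the nonempty separator ' ' is exactly PySem.Chars.splitOn on code points
def vov (input_text : String) : Int :=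
  let vovs := "AOUIEYaouiey".toList
  let temp := PySem.Chars.splitOn input_text.toList [' ']
  temp.foldl
    (fun max_vov word =>
      let max_vov_temp :=
        word.foldl (fun acc l => if PySem.Chars.isIn [l] vovs then acc + 1 else acc) (0 : Int)
      if max_vov_temp > max_vov then max_vov_temp else max_vov) 0

-- ===== PORT B =====
def vov_alt (input_text : String) : Int :=
  let vowels := "AOUIEYaouiey".toList
  let p := input_text.toList.foldl
    (fun (st : Int × Int) ch =>
      if ch = ' ' then (max st.1 st.2, 0)
      else if PySem.Chars.isIn [ch] vowels then (st.1, st.2 + 1) else st)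
    ((0 : Int), (0 : Int))
  max p.1 p.2

-- ===== PRECONDITION & SPEC =====
def Spec_vov (input_text : String) (out : Int) : Prop := out = vov_alt input_text
instance (input_text : String) (out : Int) : Decidable (Spec_vov input_text out) := by unfold Spec_vov; infer_instance

-- ===== CLAIM (what is proved, stated in full; the proofs are below) =====
def Claim_equal_vov : Prop := ∀ (input_text : String), Dom_vov input_text → Spec_vov input_text (vov input_text)

-- ===== LEMMAS AND PROOFS =====

/-- vowel test shared by both ports -/
def isVov (c : Char) : Bool := PySem.Chars.isIn [c] "AOUIEYaouiey".toList

/-- A's inner loop, from accumulator `a` -/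
def vcnt (w : List Char) (a : Int) : Int :=
  w.foldl (fun acc l => if isVov l then acc + 1 else acc) a

/-- split on the literal space character, as a plain structural recursion -/
def splitSp : List Char → List (List Char)
  | [] => [[]]
  | c :: rest =>
    if c = ' ' then [] :: splitSp rest
    else
      match splitSp rest with
      | [] => [[c]]
      | w :: t => (c :: w) :: t

/-- A's outer max step -/
def mstep (m k : Int) : Int := if k > m then k else m

/-- B's step -/
def bstep (st : Int × Int) (ch : Char) : Int × Int :=
  if ch = ' ' then (max st.1 st.2, 0)
  else if isVov ch then (st.1, st.2 + 1) else st

lemma splitSp_ne_nil (l : List Char) : splitSp l ≠ [] := by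
  cases l with
  | nil => simp [splitSp]
  | cons c rest =>
    simp only [splitSp]
    split
    · simp
    · split <;> simp

lemma vcnt_shift (w : List Char) (a : Int) : vcnt w a = a + vcnt w 0 := by
  induction w generalizing a with
  | nil => simp [vcnt]
  | cons c rest ih =>
    simp only [vcnt, List.foldl_cons] at *
    by_cases h : isVov c = true
    · simp [h]; rw [ih (a + 1), ih 1]; ring
    · simp [h]; exact ih a

lemma splitOn_go_eq (fuel : Nat) (l cur : List Char) (acc : List (List Char))
    (h : l.length < fuel) :
    PySem.Chars.splitOn.go [' '] fuel l cur acc =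
      acc.reverse ++
        (match splitSp l with
         | [] => []
         | w :: t => (cur.reverse ++ w) :: t) := by
  induction fuel generalizing l cur acc with
  | zero => omega
  | succ f ih =>
    cases l with
    | nil =>
      simp [PySem.Chars.splitOn.go, splitSp]
    | cons c rest =>
      by_cases hc : c = ' '
      · subst hc
        have hpre : List.isPrefixOf [' '] (' ' :: rest) = true := by
          simp [List.isPrefixOf]
        rw [PySem.Chars.splitOn.go]
        simp only [if_true, List.length_cons, List.length_nil, List.drop_succ_cons,
          List.drop_zero]
        rw [ih rest [] (cur.reverse :: acc) (by simpa using Nat.lt_of_succ_lt_succ h)]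
        cases hsp : splitSp rest with
        | nil => exact absurd hsp (splitSp_ne_nil rest)
        | cons w t =>
          simp [splitSp, hsp]
      · have hpre : List.isPrefixOf [' '] (c :: rest) = false := by
          simp [List.isPrefixOf]
          intro h'; exact absurd h'.symm hc
        rw [PySem.Chars.splitOn.go]
        simp only [hpre]
        rw [if_neg (by simp [hpre])]
        rw [ih rest (c :: cur) acc (by simpa using Nat.lt_of_succ_lt_succ h)]
        cases hsp : splitSp rest with
        | nil => exact absurd hsp (splitSp_ne_nil rest)
        | cons w t =>
          simp [splitSp, hsp, hc]

lemma splitOn_eq (l : List Char) :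
    PySem.Chars.splitOn l [' '] = splitSp l := by
  show PySem.Chars.splitOn.go [' '] (l.length + 1) l [] [] = splitSp l
  rw [splitOn_go_eq (l.length + 1) l [] [] (by omega)]
  cases hsp : splitSp l with
  | nil => exact absurd hsp (splitSp_ne_nil l)
  | cons w t => simp

lemma mstep_eq_max (m k : Int) : mstep m k = max m k := by
  simp only [mstep, Int.max_def]
  split_ifs <;> omega

/-- main invariant for B's single pass -/
lemma bmain (l : List Char) (best cur : Int) :
    max (l.foldl bstep (best, cur)).1 (l.foldl bstep (best, cur)).2 =
      List.foldl mstep best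
        (match splitSp l with
         | [] => []
         | w :: t => (cur + vcnt w 0) :: t.map (fun w => vcnt w 0)) := by
  induction l generalizing best cur with
  | nil =>
    simp only [splitSp, List.foldl_nil, List.foldl_cons, vcnt, List.map_nil]
    rw [mstep_eq_max]; omega
  | cons c rest ih =>
    by_cases hc : c = ' '
    · subst hc
      have hb : bstep (best, cur) ' ' = (max best cur, 0) := by simp [bstep]
      simp only [List.foldl_cons, hb]
      rw [ih (max best cur) 0]
      cases hsp : splitSp rest with
      | nil => exact absurd hsp (splitSp_ne_nil rest)
      | cons w t =>
        have hs2 : splitSp (' ' :: rest) = [] :: w :: t := by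
          simp [splitSp, hsp]
        simp only [hsp, hs2, List.foldl_cons, List.map_cons]
        congr 1
        simp [mstep_eq_max, vcnt]
    · by_cases hv : isVov c = true
      · have hb : bstep (best, cur) c = (best, cur + 1) := by simp [bstep, hc, hv]
        simp only [List.foldl_cons, hb]
        rw [ih best (cur + 1)]
        cases hsp : splitSp rest with
        | nil => exact absurd hsp (splitSp_ne_nil rest)
        | cons w t =>
          simp only [splitSp, if_neg hc, hsp, List.foldl_cons]
          have : vcnt (c :: w) 0 = 1 + vcnt w 0 := by
            simp only [vcnt, List.foldl_cons, hv, if_true]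
            exact vcnt_shift w 1
          rw [this]
          ring_nf
      · have hb : bstep (best, cur) c = (best, cur) := by simp [bstep, hc, hv]
        simp only [List.foldl_cons, hb]
        rw [ih best cur]
        cases hsp : splitSp rest with
        | nil => exact absurd hsp (splitSp_ne_nil rest)
        | cons w t =>
          simp only [splitSp, if_neg hc, hsp, List.foldl_cons]
          have : vcnt (c :: w) 0 = vcnt w 0 := by
            simp [vcnt, hv]
          rw [this]

lemma vov_eq_fold (s : String) :
    vov s = List.foldl mstep 0 ((splitSp s.toList).map (fun w => vcnt w 0)) := by
  simp only [vov, splitOn_eq, List.foldl_map]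
  rfl

-- ===== VERDICT (by name: the statement is the Claim_ definition above) =====
theorem vov_spec : Claim_equal_vov := by
  intro input_text _
  unfold Spec_vov
  rw [vov_eq_fold]
  have halt : vov_alt input_text =
      max (input_text.toList.foldl bstep ((0 : Int), (0 : Int))).1
        (input_text.toList.foldl bstep ((0 : Int), (0 : Int))).2 := rfl
  rw [halt, bmain]
  cases hsp : splitSp input_text.toList with
  | nil => exact absurd hsp (splitSp_ne_nil input_text.toList)
  | cons w t => simp
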